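-- pv_equiv track=rewrite | github.com/uit-hdl/chatbot-for-mental-health | src/insomnia_assistant.py | count_time_since_last_citation
-- ===== SOURCE A (Python) =====
-- def count_time_since_last_citation(conversation, source_name):
--     """Counts the number of responses since the source was last cited. If cited
--     in the last response, this value is 0."""
--     assistant_messages = [
--         message["content"] for message in conversation if message["role"] == "assistant"
--     ]
--     inactivity_time = 0
--     # Look backwards in conversation to find how long ago since the source was last cited
--     for i in range(1, len(assistant_messages) + 1):
--         if source_name in assistant_messages[-i]:
--             inactivity_time = i - 1
--             break
--     return inactivity_time
-- ===== SOURCE B (Python) =====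
-- def count_time_since_last_citation(conversation, source_name):
--     """Counts the number of responses since the source was last cited. If cited
--     in the last response, this value is 0."""
--     counter = 0
--     cited = False
--     for message in conversation:
--         if message["role"] == "assistant":
--             if source_name in message["content"]:
--                 counter = 0
--                 cited = True
--             else:
--                 counter += 1
--     return counter if cited else 0
-- ===== Notes on version B (the rewrite author's own statement) =====
-- stated objective: simpler
-- what changed: Replaces the intermediate assistant-message list plus backward indexed scan with break by a single forward pass keeping a counter and a cited flag.
import Mathlib
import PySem

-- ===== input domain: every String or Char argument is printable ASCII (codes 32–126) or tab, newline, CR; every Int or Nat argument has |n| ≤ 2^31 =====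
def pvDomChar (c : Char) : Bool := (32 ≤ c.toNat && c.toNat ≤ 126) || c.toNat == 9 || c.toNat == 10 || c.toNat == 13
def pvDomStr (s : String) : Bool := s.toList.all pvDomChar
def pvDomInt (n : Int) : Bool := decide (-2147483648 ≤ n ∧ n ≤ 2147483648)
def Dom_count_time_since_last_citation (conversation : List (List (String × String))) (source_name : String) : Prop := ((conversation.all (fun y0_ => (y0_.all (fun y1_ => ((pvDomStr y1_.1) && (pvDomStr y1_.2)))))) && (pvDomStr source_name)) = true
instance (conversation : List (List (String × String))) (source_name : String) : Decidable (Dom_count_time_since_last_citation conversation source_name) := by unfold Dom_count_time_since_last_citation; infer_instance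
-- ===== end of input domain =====

-- B replaces the intermediate assistant-message list and the backward indexed
-- scan with a break by one forward pass keeping a counter and a cited flag (simpler decomposition, same cost).

-- ===== PORT A =====
-- the backward 'for i in range(1, len+1): if source_name in assistant_messages[-i]: inactivity_time = i - 1; break'
def ctslcLoop (msgs : List String) (source_name : String) : List Int → Int
  | [] => 0
  | i :: rest =>
    match PySem.List.pyGet? msgs (-i) with
    | none => 0   -- unreachable: every i ∈ range(1, len+1) indexes in range
    | some s => if PySem.Str.isIn source_name s then i - 1 else ctslcLoop msgs source_name rest

def count_time_since_last_citation (conversation : List (List (String × String))) (source_name : String) : Int :=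
  let assistant_messages :=
    (conversation.filter (fun m => (PySem.Dict.mk m).getD "role" "" == "assistant")).map
      (fun m => (PySem.Dict.mk m).getD "content" "")
  ctslcLoop assistant_messages source_name (PySem.List.pyRange 1 (assistant_messages.length + 1) 1)

-- ===== PORT B =====
def count_time_since_last_citation_alt (conversation : List (List (String × String))) (source_name : String) : Int :=
  let st := conversation.foldl (fun (st : Int × Bool) m =>
    if (PySem.Dict.mk m).getD "role" "" == "assistant" then
      if PySem.Str.isIn source_name ((PySem.Dict.mk m).getD "content" "") then (0, true)
      else (st.1 + 1, st.2)
    else st) (0, false)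
  if st.2 then st.1 else 0

-- ===== PRECONDITION & SPEC =====
-- Pre_ excludes exactly the inputs on which the Python raises KeyError: a message
-- without a "role" key, or an assistant message without a "content" key.
def Pre_count_time_since_last_citation (conversation : List (List (String × String))) (source_name : String) : Prop :=
  ∀ m ∈ conversation, ((PySem.Dict.mk m).get? "role").isSome = true ∧
    ((PySem.Dict.mk m).get? "role" = some "assistant" → ((PySem.Dict.mk m).get? "content").isSome = true)
instance (conversation : List (List (String × String))) (source_name : String) : Decidable (Pre_count_time_since_last_citation conversation source_name) := by unfold Pre_count_time_since_last_citation; infer_instance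

def pvWitness_count_time_since_last_citation : (List (List (String × String))) × String :=
  ([[("role", "assistant"), ("content", "see src one")], [("role", "user"), ("content", "hi")], [("role", "assistant"), ("content", "later")]], "src")

def Spec_count_time_since_last_citation (conversation : List (List (String × String))) (source_name : String) (out : Int) : Prop := out = count_time_since_last_citation_alt conversation source_name
instance (conversation : List (List (String × String))) (source_name : String) (out : Int) : Decidable (Spec_count_time_since_last_citation conversation source_name out) := by unfold Spec_count_time_since_last_citation; infer_instance

-- ===== CLAIM (what is proved, stated in full; the proofs are below) =====
def Claim_equal_count_time_since_last_citation : Prop := ∀ (conversation : List (List (String × String))) (source_name : String), Dom_count_time_since_last_citation conversation source_name → Pre_count_time_since_last_citation conversation source_name → Spec_count_time_since_last_citation conversation source_name (count_time_since_last_citation conversation source_name)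

-- ===== LEMMAS AND PROOFS =====
-- B's fold step, written on the extracted message content only
def ctslcStep (source_name : String) (st : Int × Bool) (s : String) : Int × Bool :=
  if PySem.Str.isIn source_name s then (0, true) else (st.1 + 1, st.2)

-- forward reading of the backward scan: position j into the reversed suffix
def ctslcTail (source_name : String) (j : Int) : List String → Int
  | [] => 0
  | s :: rest => if PySem.Str.isIn source_name s then j else ctslcTail source_name (j + 1) rest

-- B's fold over the conversation equals the same fold over the assistant contents
theorem foldl_filter_map (source_name : String) (l : List (List (String × String))) (st : Int × Bool) :
    l.foldl (fun (st : Int × Bool) m =>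
      if (PySem.Dict.mk m).getD "role" "" == "assistant" then
        if PySem.Str.isIn source_name ((PySem.Dict.mk m).getD "content" "") then (0, true)
        else (st.1 + 1, st.2)
      else st) st
    = ((l.filter (fun m => (PySem.Dict.mk m).getD "role" "" == "assistant")).map
        (fun m => (PySem.Dict.mk m).getD "content" "")).foldl (ctslcStep source_name) st := by
  induction l generalizing st with
  | nil => rfl
  | cons m rest ih =>
    rw [List.foldl_cons, List.filter_cons]
    by_cases h : ((PySem.Dict.mk m).getD "role" "" == "assistant") = true
    · simp only [if_pos h, List.map_cons, List.foldl_cons]; exact ih _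
    · simp only [if_neg h]; exact ih _

-- A's index loop starting at index j+1 walks the reversed list from position j
theorem ctslcLoop_eq_tail (msgs : List String) (source_name : String) :
    ∀ (n j : Nat), msgs.length - j = n → j ≤ msgs.length →
    ctslcLoop msgs source_name (PySem.List.pyRange ((j : Int) + 1) (msgs.length + 1) 1)
      = ctslcTail source_name (j : Int) (msgs.reverse.drop j) := by
  intro n
  induction n with
  | zero =>
    intro j hn hj
    have hjm : j = msgs.length := by omega
    rw [PySem.List.pyRange_one_eq_nil (by omega)]
    rw [List.drop_eq_nil_of_le (by simp [hjm])]
    rfl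
  | succ n ih =>
    intro j hn hj
    have hjlt : j < msgs.length := by omega
    have hjr : j < msgs.reverse.length := by simpa using hjlt
    have hcast : ((j + 1 : Nat) : Int) = (j : Int) + 1 := by push_cast; ring
    rw [PySem.List.pyRange_one_cons (by omega)]
    obtain ⟨v, hv⟩ : ∃ v, msgs[msgs.length - 1 - j]? = some v :=
      ⟨_, List.getElem?_eq_getElem (by omega)⟩
    have hget : PySem.List.pyGet? msgs (-((j : Int) + 1)) = some v := by
      rw [← hcast, PySem.List.pyGet?_neg_natCast msgs (j + 1) (by omega) (by omega)]
      have hidx : msgs.length - (j + 1) = msgs.length - 1 - j := by omega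
      rw [hidx, hv]
    have h1 : msgs.reverse[j] = v := by
      have h2 := List.getElem?_reverse (l := msgs) (i := j) hjlt
      rw [List.getElem?_eq_getElem hjr, hv] at h2
      exact Option.some.inj h2
    have hdrop : List.drop j msgs.reverse = v :: List.drop (j + 1) msgs.reverse := by
      rw [← h1]
      exact (List.getElem_cons_drop hjr).symm
    rw [hdrop]
    unfold ctslcLoop ctslcTail
    simp only [hget]
    by_cases hc : PySem.Str.isIn source_name v = true
    · rw [if_pos hc, if_pos hc]
      ring
    · rw [if_neg hc, if_neg hc]
      have hrec := ih (j + 1) (by omega) (by omega)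
      rw [hcast] at hrec
      exact hrec

-- a tail scan over hit-free messages yields 0
theorem ctslcTail_no_hit (source_name : String) (l : List String)
    (h : ∀ s ∈ l, PySem.Str.isIn source_name s = false) : ∀ j, ctslcTail source_name j l = 0 := by
  induction l with
  | nil => intro j; rfl
  | cons s rest ih =>
    intro j
    have hs := h s (by simp)
    unfold ctslcTail
    rw [if_neg (by simpa using hs)]
    exact ih (fun t ht => h t (by simp [ht])) _

-- shifting the starting position shifts the result, given some message hits
theorem ctslcTail_shift (source_name : String) (l : List String)
    (h : ∃ s ∈ l, PySem.Str.isIn source_name s = true) :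
    ∀ j, ctslcTail source_name (j + 1) l = ctslcTail source_name j l + 1 := by
  induction l with
  | nil => simp at h
  | cons s rest ih =>
    intro j
    unfold ctslcTail
    by_cases hc : PySem.Str.isIn source_name s = true
    · rw [if_pos hc, if_pos hc]
    · have hr : ∃ t ∈ rest, PySem.Str.isIn source_name t = true := by
        rcases h with ⟨t, ht, hh⟩
        rcases List.mem_cons.mp ht with rfl | htr
        · exact absurd hh hc
        · exact ⟨t, htr, hh⟩
      rw [if_neg hc, if_neg hc]
      exact ih hr (j + 1)

-- characterisation of B's fold state against the reversed-list reading of A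
theorem ctslcFold_char (source_name : String) (msgs : List String) :
    (msgs.foldl (ctslcStep source_name) (0, false)).2
        = msgs.any (fun t => PySem.Str.isIn source_name t) ∧
    ((msgs.foldl (ctslcStep source_name) (0, false)).2 = true →
      (msgs.foldl (ctslcStep source_name) (0, false)).1
        = ctslcTail source_name 0 msgs.reverse) := by
  induction msgs using List.reverseRecOn with
  | nil => simp [ctslcTail]
  | append_singleton ms s ih =>
    obtain ⟨ih2, ih1⟩ := ih
    rw [List.foldl_append, List.foldl_cons, List.foldl_nil, List.reverse_append,
        List.reverse_singleton, List.singleton_append, List.any_append]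
    by_cases hc : PySem.Chars.isIn source_name.toList s.toList = true
    · constructor
      · simp [ctslcStep, hc]
      · intro _
        simp [ctslcStep, ctslcTail, hc]
    · have hstep : ctslcStep source_name (List.foldl (ctslcStep source_name) (0, false) ms) s
          = ((List.foldl (ctslcStep source_name) (0, false) ms).1 + 1,
             (List.foldl (ctslcStep source_name) (0, false) ms).2) := by
        simp [ctslcStep, hc]
      rw [hstep]
      refine ⟨by simp [ih2, hc], ?_⟩
      intro hf
      simp only at hf
      have hany : ∃ t ∈ ms.reverse, PySem.Str.isIn source_name t = true := by
        rcases List.any_eq_true.mp (ih2 ▸ hf) with ⟨t, ht, hh⟩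
        exact ⟨t, by simp [ht], by simpa using hh⟩
      unfold ctslcTail
      rw [if_neg (by simpa using hc)]
      rw [ctslcTail_shift source_name ms.reverse hany 0, ← ih1 hf]

-- ===== VERDICT (by name: the statement is the Claim_ definition above) =====
theorem count_time_since_last_citation_spec : Claim_equal_count_time_since_last_citation := by
  intro conversation source_name _ _
  unfold Spec_count_time_since_last_citation count_time_since_last_citation count_time_since_last_citation_alt
  rw [foldl_filter_map]
  set msgs := (conversation.filter (fun m => (PySem.Dict.mk m).getD "role" "" == "assistant")).map
      (fun m => (PySem.Dict.mk m).getD "content" "") with hm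
  obtain ⟨h2, h1⟩ := ctslcFold_char source_name msgs
  have hA : ctslcLoop msgs source_name (PySem.List.pyRange 1 (msgs.length + 1) 1)
      = ctslcTail source_name 0 msgs.reverse := by
    have := ctslcLoop_eq_tail msgs source_name msgs.length 0 (by omega) (by omega)
    simpa using this
  by_cases hc : (msgs.foldl (ctslcStep source_name) (0, false)).2 = true
  · rw [hA, ← h1 hc]
    simp [hc]
  · have hnone : ∀ s ∈ msgs.reverse, PySem.Str.isIn source_name s = false := by
      intro s hs
      have hm' : s ∈ msgs := by simpa using hs
      by_contra hne
      have : msgs.any (fun t => PySem.Str.isIn source_name t) = true :=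
        List.any_eq_true.mpr ⟨s, hm', by simpa using hne⟩
      rw [← h2] at this
      exact hc this
    rw [hA, ctslcTail_no_hit source_name msgs.reverse hnone 0]
    simp [hc]
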